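-- pv_equiv track=rewrite | github.com/ExcellentGamer/Goddard-ImportExport-Project | goddard_addon/export_goddard.py | split_dynlists
-- ===== SOURCE A (Python) =====
-- def split_dynlists(dynlist):
--     lists = []
--
--     splitpoint = "#define VTX_NUM"
--     indices = []
--     start = 0
--     while True:
--         idx = dynlist.find(splitpoint, start)
--         if idx == -1:
--             break
--         indices.append(idx)
--         start = idx + len(splitpoint)
--
--     if len(indices) <= 1:
--         return [dynlist]
--
--     for i, idx in enumerate(indices):
--         if i + 1 < len(indices):
--             lists.append(dynlist[idx:indices[i + 1]])
--         else:
--             lists.append(dynlist[idx:])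
--
--     if indices[0] != 0:
--         lists[0] = dynlist[:indices[0]] + lists[0]
--
--     return lists
-- ===== SOURCE B (Python) =====
-- def split_dynlists(dynlist):
--     marker = "#define VTX_NUM"
--     parts = dynlist.split(marker)
--     if len(parts) <= 2:
--         return [dynlist]
--     lists = [marker + p for p in parts[1:]]
--     lists[0] = parts[0] + lists[0]
--     return lists
-- ===== Notes on version B (the rewrite author's own statement) =====
-- stated objective: simpler
-- what changed: Replaces the manual find-loop that collects marker indices plus the index-pair slicing pass with a single str.split on the marker followed by reattaching the marker to each tail piece and the prefix to the first chunk.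
import Mathlib
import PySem

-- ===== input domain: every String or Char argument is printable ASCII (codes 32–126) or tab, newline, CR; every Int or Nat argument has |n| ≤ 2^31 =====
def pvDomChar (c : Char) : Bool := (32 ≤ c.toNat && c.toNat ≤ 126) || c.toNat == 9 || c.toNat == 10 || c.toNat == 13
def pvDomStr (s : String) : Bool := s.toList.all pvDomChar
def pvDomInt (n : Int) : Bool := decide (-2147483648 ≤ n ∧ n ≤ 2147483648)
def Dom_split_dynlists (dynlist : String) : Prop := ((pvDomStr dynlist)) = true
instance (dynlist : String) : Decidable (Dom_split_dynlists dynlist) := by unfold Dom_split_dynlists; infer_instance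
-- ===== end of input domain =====

-- B replaces A's manual find-loop over marker indices and index-pair slicing with one split on the marker plus reassembly (objective: simpler).


-- ===== PORT A =====
-- the `while True: idx = dynlist.find(splitpoint, start) …` loop; fuel (length+1) only
-- makes the recursion structural — each found index advances `start` by len(splitpoint) ≥ 1
def pvCollectIndices (dynlist : String) (start : Int) (fuel : Nat) : List Int :=
  match fuel with
  | 0 => []
  | fuel + 1 =>
    let idx := PySem.Str.findFrom dynlist "#define VTX_NUM" start
    if idx = -1 then []
    else idx :: pvCollectIndices dynlist (idx + PySem.Str.len "#define VTX_NUM") fuel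

def split_dynlists (dynlist : String) : List String :=
  let indices := pvCollectIndices dynlist 0 (dynlist.length + 1)
  if indices.length ≤ 1 then [dynlist]
  else
    let lists := (PySem.List.enumerate indices 0).foldl (fun lists p =>
      if p.1 + 1 < (indices.length : Int) then
        lists ++ [PySem.Str.slice dynlist (some p.2) (some (PySem.List.pyGetD indices (p.1 + 1) 0))]
      else
        lists ++ [PySem.Str.slice dynlist (some p.2) none]) []
    if PySem.List.pyGetD indices 0 0 ≠ 0 then
      match lists with
      | [] => []
      | h :: t => (PySem.Str.slice dynlist none (some (PySem.List.pyGetD indices 0 0)) ++ h) :: t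
    else lists

-- ===== PORT B =====
def split_dynlists_alt (dynlist : String) : List String :=
  let marker := "#define VTX_NUM"
  match PySem.Str.split? dynlist marker with
  | none => [dynlist]   -- unreachable: the marker is nonempty
  | some parts =>
    if parts.length ≤ 2 then [dynlist]
    else
      let lists := (PySem.List.slice parts (some 1) none).map (fun p => marker ++ p)
      match lists with
      | [] => []
      | h :: t => (PySem.List.pyGetD parts 0 "" ++ h) :: t

-- ===== PRECONDITION & SPEC =====
def Spec_split_dynlists (dynlist : String) (out : List String) : Prop := out = split_dynlists_alt dynlist
instance (dynlist : String) (out : List String) : Decidable (Spec_split_dynlists dynlist out) := by unfold Spec_split_dynlists; infer_instance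

-- ===== CLAIM (what is proved, stated in full; the proofs are below) =====
def Claim_equal_split_dynlists : Prop := ∀ (dynlist : String), Dom_split_dynlists dynlist → Spec_split_dynlists dynlist (split_dynlists dynlist)

-- ===== LEMMAS AND PROOFS =====

def pvMk : List Char := "#define VTX_NUM".toList
def pvSplitF (l : List Char) : List (List Char) :=
  match l with
  | [] => [[]]
  | c :: rest =>
    if pvMk.isPrefixOf (c :: rest) then
      [] :: pvSplitF (List.drop 15 (c :: rest))
    else
      match pvSplitF rest with
      | [] => []
      | h :: t => (c :: h) :: t
termination_by l.length
decreasing_by all_goals (simp only [List.length_drop, List.length_cons]; omega)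

lemma pvSplitF_ne_nil (l : List Char) : pvSplitF l ≠ [] := by
  fun_induction pvSplitF l with
  | case1 => simp
  | case2 c rest h ih => simp
  | case3 c rest h hm ih => exact absurd hm ih
  | case4 c rest h hd tl hm ih => simp

lemma pvFindGo_offset (sub : List Char) (l : List Char) (k : Nat) :
    PySem.Chars.find.go sub l k =
      if PySem.Chars.find l sub = -1 then -1 else PySem.Chars.find l sub + k := by
  induction l generalizing k with
  | nil =>
    by_cases hs : sub.isEmpty <;> simp [PySem.Chars.find.go, PySem.Chars.find, hs]
  | cons c rest ih =>
    by_cases hp : sub.isPrefixOf (c :: rest)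
    · simp [PySem.Chars.find.go, PySem.Chars.find, hp]
    · have hge := PySem.Chars.neg_one_le_find rest sub
      have hfind : PySem.Chars.find (c :: rest) sub = PySem.Chars.find.go sub rest 1 := by
        simp [PySem.Chars.find, PySem.Chars.find.go, hp]
      rw [show PySem.Chars.find.go sub (c :: rest) k = PySem.Chars.find.go sub rest (k+1) by
        simp [PySem.Chars.find.go, hp]]
      rw [ih (k+1), hfind, ih 1]
      have : PySem.Chars.find rest sub = PySem.Chars.find.go sub rest 0 := rfl
      by_cases h1 : PySem.Chars.find rest sub = -1 <;> simp [h1]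
      split <;> omega

lemma pvMk_ne_empty : pvMk.isEmpty = false := by decide
lemma pvMk_length : pvMk.length = 15 := by decide

lemma pvFind_cons_prefix (c : Char) (rest : List Char) (hp : pvMk.isPrefixOf (c :: rest)) :
    PySem.Chars.find (c :: rest) pvMk = 0 := by
  simp [PySem.Chars.find, PySem.Chars.find.go, hp]

lemma pvFind_cons_not_prefix (c : Char) (rest : List Char) (hp : ¬ pvMk.isPrefixOf (c :: rest)) :
    PySem.Chars.find (c :: rest) pvMk =
      if PySem.Chars.find rest pvMk = -1 then -1 else PySem.Chars.find rest pvMk + 1 := by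
  have : PySem.Chars.find (c :: rest) pvMk = PySem.Chars.find.go pvMk rest 1 := by
    simp [PySem.Chars.find, PySem.Chars.find.go, hp]
  rw [this, pvFindGo_offset]
  norm_num

lemma pvSplitF_find_neg (l : List Char) (h : PySem.Chars.find l pvMk = -1) :
    pvSplitF l = [l] := by
  fun_induction pvSplitF l with
  | case1 => rfl
  | case2 c rest hp ih => rw [pvFind_cons_prefix c rest hp] at h; omega
  | case3 c rest hp hm ih =>
    exact absurd hm (pvSplitF_ne_nil rest)
  | case4 c rest hp hd tl hm ih =>
    rw [pvFind_cons_not_prefix c rest hp] at h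
    have h1 : PySem.Chars.find rest pvMk = -1 := by
      by_cases h2 : PySem.Chars.find rest pvMk = -1
      · exact h2
      · have hge := PySem.Chars.neg_one_le_find rest pvMk
        simp [h2] at h; omega
    have := ih h1
    rw [hm] at this
    simp at this
    simp [this.1, this.2]

lemma pvSplitF_find_pos (l : List Char) : ∀ (i : Nat), PySem.Chars.find l pvMk = (i : Int) →
    pvSplitF l = List.take i l :: pvSplitF (List.drop (i + 15) l) := by
  fun_induction pvSplitF l with
  | case1 =>
    intro i h
    rw [show PySem.Chars.find [] pvMk = -1 from by decide] at h
    omega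
  | case2 c rest hp ih =>
    intro i h
    rw [pvFind_cons_prefix c rest hp] at h
    have hi : i = 0 := by omega
    subst hi
    simp
  | case3 c rest hp hm ih => exact absurd hm (pvSplitF_ne_nil rest)
  | case4 c rest hp hd tl hm ih =>
    intro i h
    rw [pvFind_cons_not_prefix c rest hp] at h
    by_cases h1 : PySem.Chars.find rest pvMk = -1
    · simp [h1] at h
    · simp [h1] at h
      have hge := PySem.Chars.neg_one_le_find rest pvMk
      have hj : PySem.Chars.find rest pvMk = ((i - 1 : Nat) : Int) := by omega
      have hi1 : 1 ≤ i := by omega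
      have h2 := ih (i-1) hj
      rw [hm] at h2
      obtain ⟨e1, e2⟩ := List.cons_eq_cons.mp h2
      subst e1
      rw [e2]
      have hi' : i = (i - 1) + 1 := by omega
      rw [hi']
      simp [List.take_succ_cons, List.drop_succ_cons]

lemma pvSplitF_join (l : List Char) :
    ∀ h t, pvSplitF l = h :: t → l = h ++ (t.map (fun p => pvMk ++ p)).flatten := by
  fun_induction pvSplitF l with
  | case1 => intro h t he; simp at he; simp [he.1, he.2]
  | case2 c rest hp ih =>
    intro h t he
    obtain ⟨h', t', hm⟩ := List.exists_cons_of_ne_nil (pvSplitF_ne_nil (List.drop 15 (c :: rest)))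
    rw [hm] at he
    simp at he
    obtain ⟨he1, he2⟩ := he
    have hrec := ih h' t' hm
    have hpre : pvMk ++ List.drop pvMk.length (c :: rest) = c :: rest :=
      List.prefix_iff_eq_append.mp (List.isPrefixOf_iff_prefix.mp hp)
    rw [pvMk_length] at hpre
    subst he1 he2
    simp only [List.map_cons, List.flatten_cons, List.nil_append, List.append_assoc]
    rw [← hrec, hpre]
  | case3 c rest hp hm ih => exact absurd hm (pvSplitF_ne_nil rest)
  | case4 c rest hp hd tl hm ih =>
    intro h t he
    simp at he
    obtain ⟨he1, he2⟩ := he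
    have hrec := ih hd tl hm
    subst he1 he2
    simp [← hrec]

def pvConsHead (pre : List Char) : List (List Char) → List (List Char)
  | [] => []
  | h :: t => (pre ++ h) :: t

lemma pvSplitOnGo_spec (fuel : Nat) : ∀ (l cur : List Char) (accl : List (List Char)),
    l.length ≤ fuel →
    PySem.Chars.splitOn.go pvMk fuel l cur accl =
      accl.reverse ++ pvConsHead cur.reverse (pvSplitF l) := by
  induction fuel with
  | zero =>
    intro l cur accl hl
    have : l = [] := List.length_eq_zero_iff.mp (Nat.le_zero.mp hl)
    subst this
    simp [PySem.Chars.splitOn.go, pvSplitF, pvConsHead]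
  | succ fuel ih =>
    intro l cur accl hl
    match l with
    | [] => simp [PySem.Chars.splitOn.go, pvSplitF, pvConsHead]
    | c :: rest =>
      by_cases hp : pvMk.isPrefixOf (c :: rest)
      · have hstep : PySem.Chars.splitOn.go pvMk (fuel+1) (c :: rest) cur accl =
            PySem.Chars.splitOn.go pvMk fuel (List.drop pvMk.length (c :: rest)) [] (cur.reverse :: accl) := by
          simp [PySem.Chars.splitOn.go, hp]
        have hlen : pvMk.length ≤ (c :: rest).length := (List.isPrefixOf_iff_prefix.mp hp).length_le
        rw [pvMk_length] at hstep hlen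
        rw [hstep, ih _ _ _ (by simp only [List.length_drop, List.length_cons] at hl hlen ⊢; omega)]
        obtain ⟨h', t', hm⟩ := List.exists_cons_of_ne_nil (pvSplitF_ne_nil (List.drop 15 (c :: rest)))
        rw [hm]
        rw [show pvSplitF (c :: rest) = [] :: pvSplitF (List.drop 15 (c :: rest)) from by
          rw [pvSplitF]; simp [hp]]
        rw [hm]
        simp [pvConsHead]
      · have hstep : PySem.Chars.splitOn.go pvMk (fuel+1) (c :: rest) cur accl =
            PySem.Chars.splitOn.go pvMk fuel rest (c :: cur) accl := by
          simp [PySem.Chars.splitOn.go, hp]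
        rw [hstep, ih _ _ _ (by simp at hl ⊢; omega)]
        obtain ⟨h', t', hm⟩ := List.exists_cons_of_ne_nil (pvSplitF_ne_nil rest)
        rw [hm]
        rw [show pvSplitF (c :: rest) = (c :: h') :: t' from by
          rw [pvSplitF]; simp [hp, hm]]
        simp [pvConsHead]

lemma pvSplitOn_eq (s : List Char) : PySem.Chars.splitOn s pvMk = pvSplitF s := by
  rw [PySem.Chars.splitOn, pvSplitOnGo_spec (s.length + 1) s [] [] (by omega)]
  obtain ⟨h', t', hm⟩ := List.exists_cons_of_ne_nil (pvSplitF_ne_nil s)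
  rw [hm]
  simp [pvConsHead]

def pvOccPos (q : Nat) : List (List Char) → List Int
  | [] => []
  | p :: ps => (q : Int) :: pvOccPos (q + 15 + p.length) ps

lemma pvFindFrom_past (s : List Char) (q : Nat) (h : s.length < q) :
    PySem.Chars.findFrom s pvMk (q : Int) none = -1 := by
  rw [PySem.Chars.findFrom]
  simp
  intro h2
  omega

lemma pvStrLen_mk : PySem.Str.len "#define VTX_NUM" = 15 := by decide

lemma pvCollect_spec (s : String) (fuel : Nat) : ∀ (q : Nat) (h : List Char) (t : List (List Char)),
    pvSplitF (List.drop q s.toList) = h :: t →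
    (List.drop q s.toList).length < fuel →
    pvCollectIndices s (q : Int) fuel = pvOccPos (q + h.length) t := by
  induction fuel with
  | zero => intro q h t _ hlt; omega
  | succ fuel ih =>
    intro q h t hsp hlt
    by_cases hq : s.toList.length < q
    · -- q past the end: drop is [], splitF [[]], no find
      have hd : List.drop q s.toList = [] := List.drop_eq_nil_of_le (by omega)
      rw [hd] at hsp
      simp [pvSplitF] at hsp
      rw [pvCollectIndices]
      simp only [PySem.Str.findFrom]
      rw [show ("#define VTX_NUM" : String).toList = pvMk from rfl, pvFindFrom_past s.toList q hq]
      simp [hsp.2, pvOccPos]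
    · have hqle : q ≤ s.toList.length := by omega
      have hff : PySem.Chars.findFrom s.toList pvMk (q : Int) none =
          if PySem.Chars.find (List.drop q s.toList) pvMk = -1 then -1
          else (q : Int) + PySem.Chars.find (List.drop q s.toList) pvMk :=
        PySem.Chars.findFrom_natCast s.toList pvMk q hqle
      by_cases hfe : PySem.Chars.find (List.drop q s.toList) pvMk = -1
      · have := pvSplitF_find_neg _ hfe
        rw [this] at hsp
        simp at hsp
        rw [pvCollectIndices]
        simp only [PySem.Str.findFrom, show ("#define VTX_NUM" : String).toList = pvMk from rfl]
        rw [hff]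
        simp [hfe, hsp.2, pvOccPos]
      · have hpos : (List.drop q s.toList) ≠ [] := by
          intro hnil; rw [hnil] at hfe; exact hfe (by decide)
        have hpos' : 0 < (List.drop q s.toList).length := List.length_pos_of_ne_nil hpos
        have hge := PySem.Chars.neg_one_le_find (List.drop q s.toList) pvMk
        have hle := PySem.Chars.find_le_length (List.drop q s.toList) pvMk
        simp only [List.length_drop] at hle
        set fr := PySem.Chars.find (List.drop q s.toList) pvMk with hfr
        have hi : fr = ((fr.toNat : Nat) : Int) := by omega
        have hstep := pvSplitF_find_pos _ fr.toNat hi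
        rw [hstep] at hsp
        obtain ⟨he1, he2⟩ := List.cons_eq_cons.mp hsp
        -- h = take i l, so h.length = i
        have hlen_h : h.length = fr.toNat := by
          rw [← he1]
          simp only [List.length_take, List.length_drop]
          omega
        -- t = pvSplitF of the rest; t is nonempty
        obtain ⟨p, ps, hm⟩ := List.exists_cons_of_ne_nil
          (pvSplitF_ne_nil (List.drop (fr.toNat + 15) (List.drop q s.toList)))
        rw [pvCollectIndices]
        simp only [PySem.Str.findFrom, show ("#define VTX_NUM" : String).toList = pvMk from rfl]
        rw [hff]
        have hne : ¬ ((q : Int) + fr = -1) := by omega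
        simp only [hfe, if_false, hne, if_false, pvStrLen_mk]
        have harg : (q : Int) + fr + 15 = (((q + fr.toNat + 15 : Nat)) : Int) := by omega
        have hm' : pvSplitF (List.drop (q + fr.toNat + 15) s.toList) = p :: ps := by
          rw [show q + fr.toNat + 15 = q + (fr.toNat + 15) from by omega, ← List.drop_drop]; exact hm
        rw [harg, ih (q + fr.toNat + 15) p ps hm' (by
          simp only [List.length_drop] at hlt hpos' ⊢
          omega)]
        rw [← he2, hm]
        rw [pvOccPos]
        have : (q : Int) + fr = ((q + h.length : Nat) : Int) := by omega
        rw [this, show q + fr.toNat + 15 + p.length = q + h.length + 15 + p.length from by omega]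

lemma pvOccPos_length (q : Nat) (ps : List (List Char)) : (pvOccPos q ps).length = ps.length := by
  induction ps generalizing q <;> simp [pvOccPos, *]

lemma pvSegs (cs : List Char) (indices : List Int) :
    ∀ (ps : List (List Char)) (j q : Nat),
    List.drop j indices = pvOccPos q ps →
    List.drop q cs = (ps.map (fun p => pvMk ++ p)).flatten →
    (PySem.List.enumerate (pvOccPos q ps) (j : Int)).map
      (fun pr => if pr.1 + 1 < (indices.length : Int) then
          PySem.List.slice cs (some pr.2) (some (PySem.List.pyGetD indices (pr.1 + 1) 0))
        else PySem.List.slice cs (some pr.2) none)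
    = ps.map (fun p => pvMk ++ p) := by
  intro ps
  induction ps with
  | nil => intro j q _ _; simp [pvOccPos]
  | cons p ps ih =>
    intro j q hidx hcs
    rw [pvOccPos, PySem.List.enumerate_cons, List.map_cons]
    have hjlt : j < indices.length := by
      have := congrArg List.length hidx
      simp [pvOccPos_length] at this
      omega
    match ps with
    | [] =>
      have hlen : indices.length = j + 1 := by
        have := congrArg List.length hidx
        simp [pvOccPos_length] at this
        omega
      have hcond : ¬ ((j : Int) + 1 < (indices.length : Int)) := by
        rw [hlen]; push_cast; omega
      simp only [hcond, if_false, pvOccPos, PySem.List.enumerate_nil, List.map_nil,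
        PySem.List.slice_from_natCast]
      rw [hcs]
      simp
    | p' :: ps' =>
      have hlen : j + 2 ≤ indices.length := by
        have := congrArg List.length hidx
        simp [pvOccPos_length] at this
        omega
      have hcond : ((j : Int) + 1 < (indices.length : Int)) := by omega
      have hget : PySem.List.pyGetD indices ((j : Int) + 1) 0 = ((q + 15 + p.length : Nat) : Int) := by
        rw [show ((j : Int) + 1) = (((j + 1 : Nat)) : Int) from by push_cast; ring,
          PySem.List.pyGetD_natCast]
        have hdrop : List.drop (j+1) indices = pvOccPos (q + 15 + p.length) (p' :: ps') := by
          rw [← List.tail_drop, hidx, pvOccPos]; rfl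
        have : indices[(j+1)]? = some ((q + 15 + p.length : Nat) : Int) := by
          rw [show indices[(j+1)]? = (List.drop (j+1) indices)[0]? from by
            rw [List.getElem?_drop], hdrop, pvOccPos]
          rfl
        simp [List.getD, this]
      rw [if_pos hcond, hget, PySem.List.slice_natCast]
      have hflat : List.drop q cs = pvMk ++ p ++ ((p' :: ps').map (fun p => pvMk ++ p)).flatten := by
        rw [hcs]; simp
      have hfirst : List.take (q + 15 + p.length - q) (List.drop q cs) = pvMk ++ p := by
        rw [hflat, show q + 15 + p.length - q = (pvMk ++ p).length from by simp [pvMk_length]; omega]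
        exact List.take_left
      rw [hfirst]
      congr 1
      rw [show ((j : Int) + 1) = (((j + 1 : Nat)) : Int) from by push_cast; ring]
      apply ih (j+1) (q + 15 + p.length)
      · rw [← List.tail_drop, hidx, pvOccPos]; rfl
      · rw [show q + 15 + p.length = q + (15 + p.length) from by omega, ← List.drop_drop, hflat,
          show (15 : Nat) + p.length = (pvMk ++ p).length from by simp [pvMk_length]]
        exact List.drop_left

lemma pvSplit?_eq (dynlist : String) :
    PySem.Str.split? dynlist "#define VTX_NUM" =
      some ((pvSplitF dynlist.toList).map String.ofList) := by
  rw [PySem.Str.split?, PySem.Chars.split?,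
    show ("#define VTX_NUM" : String).toList = pvMk from rfl, pvMk_ne_empty]
  simp [pvSplitOn_eq]

theorem split_dynlists_spec_aux (dynlist : String) :
    split_dynlists dynlist = split_dynlists_alt dynlist := by
  obtain ⟨p0, ps, hsp⟩ := List.exists_cons_of_ne_nil (pvSplitF_ne_nil dynlist.toList)
  have hjoin := pvSplitF_join dynlist.toList p0 ps hsp
  have hindices : pvCollectIndices dynlist 0 (dynlist.length + 1) = pvOccPos p0.length ps := by
    have := pvCollect_spec dynlist (dynlist.length + 1) 0 p0 ps (by simpa using hsp)
      (by simp)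
    simpa using this
  have hB := pvSplit?_eq dynlist
  rw [split_dynlists]
  simp only [hindices]
  match ps with
  | [] =>
    simp [pvOccPos, split_dynlists_alt, hB, hsp]
  | [p1] =>
    simp [pvOccPos, split_dynlists_alt, hB, hsp]
  | p1 :: p2 :: ps' =>
    have hlen2 : ¬ ((pvOccPos p0.length (p1 :: p2 :: ps')).length ≤ 1) := by
      simp [pvOccPos_length]
    have hlenB : ¬ (((pvSplitF dynlist.toList).map String.ofList).length ≤ 2) := by
      rw [hsp]; simp
    have hBval : split_dynlists_alt dynlist =
        (PySem.List.pyGetD ((pvSplitF dynlist.toList).map String.ofList) 0 "" ++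
          ("#define VTX_NUM" ++ String.ofList p1)) ::
          (p2 :: ps').map (fun p => "#define VTX_NUM" ++ String.ofList p) := by
      rw [split_dynlists_alt, hB]
      simp only []
      rw [if_neg (show ¬ (((pvSplitF dynlist.toList).map String.ofList).length ≤ 2) from by
        rw [hsp]; simp)]
      rw [show PySem.List.slice ((pvSplitF dynlist.toList).map String.ofList) (some 1) none =
          ((pvSplitF dynlist.toList).map String.ofList).drop 1 from by
        rw [show (1 : Int) = ((1 : Nat) : Int) from rfl, PySem.List.slice_from_natCast]]
      rw [hsp]
      simp only [List.map_cons, List.drop_succ_cons, List.drop_zero, List.map_map]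
      rfl
    rw [hBval]
    -- A side
    rw [if_neg hlen2]
    -- turn A's foldl into a map
    have hfun : (fun (lists : List String) (p : Int × Int) =>
        if p.1 + 1 < ((pvOccPos p0.length (p1 :: p2 :: ps')).length : Int) then
          lists ++ [PySem.Str.slice dynlist (some p.2)
            (some (PySem.List.pyGetD (pvOccPos p0.length (p1 :: p2 :: ps')) (p.1 + 1) 0))]
        else
          lists ++ [PySem.Str.slice dynlist (some p.2) none]) =
        (fun lists p => lists ++ [if p.1 + 1 < ((pvOccPos p0.length (p1 :: p2 :: ps')).length : Int) then
          PySem.Str.slice dynlist (some p.2)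
            (some (PySem.List.pyGetD (pvOccPos p0.length (p1 :: p2 :: ps')) (p.1 + 1) 0))
        else PySem.Str.slice dynlist (some p.2) none]) := by
      funext lists p
      by_cases h : p.1 + 1 < ((pvOccPos p0.length (p1 :: p2 :: ps')).length : Int) <;> simp [h]
    rw [hfun, PySem.List.foldl_append_singleton_eq_map]
    have hinj : ∀ (xs ys : List String), List.map String.toList xs = List.map String.toList ys → xs = ys :=
      fun xs ys h => List.map_injective_iff.mpr (fun a b hab => String.toList_inj.mp hab) h
    have hdrop0 : List.drop p0.length dynlist.toList =
        ((p1 :: p2 :: ps').map (fun p => pvMk ++ p)).flatten := by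
      rw [hjoin]; exact List.drop_left
    have hsegs := pvSegs dynlist.toList (pvOccPos p0.length (p1 :: p2 :: ps'))
      (p1 :: p2 :: ps') 0 p0.length (by simp) hdrop0
    have hmapF : List.map String.toList ([] ++ (PySem.List.enumerate (pvOccPos p0.length (p1 :: p2 :: ps')) 0).map
        (fun pr => if pr.1 + 1 < ((pvOccPos p0.length (p1 :: p2 :: ps')).length : Int) then
          PySem.Str.slice dynlist (some pr.2)
            (some (PySem.List.pyGetD (pvOccPos p0.length (p1 :: p2 :: ps')) (pr.1 + 1) 0))
        else PySem.Str.slice dynlist (some pr.2) none)) =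
        (p1 :: p2 :: ps').map (fun p => pvMk ++ p) := by
      rw [List.nil_append, List.map_map, ← hsegs]
      show _ = List.map _ (PySem.List.enumerate _ ((0 : Nat) : Int))
      rw [Nat.cast_zero]
      apply List.map_congr_left
      intro pr _
      by_cases h : pr.1 + 1 < ((pvOccPos p0.length (p1 :: p2 :: ps')).length : Int) <;>
        simp [h, Function.comp, PySem.Str.slice, PySem.Chars.slice_eq_listSlice]
    set L := [] ++ (PySem.List.enumerate (pvOccPos p0.length (p1 :: p2 :: ps')) 0).map
        (fun pr => if pr.1 + 1 < ((pvOccPos p0.length (p1 :: p2 :: ps')).length : Int) then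
          PySem.Str.slice dynlist (some pr.2)
            (some (PySem.List.pyGetD (pvOccPos p0.length (p1 :: p2 :: ps')) (pr.1 + 1) 0))
        else PySem.Str.slice dynlist (some pr.2) none) with hLdef
    match hL : L with
    | [] => simp at hmapF
    | h :: t =>
      simp only [List.map_cons] at hmapF
      obtain ⟨hh, ht⟩ := List.cons_eq_cons.mp hmapF
      have hget0 : PySem.List.pyGetD (pvOccPos p0.length (p1 :: p2 :: ps')) 0 0 = (p0.length : Int) := by
        rw [pvOccPos, PySem.List.pyGetD_ofNat']
        rfl
      rw [hget0]
      have hgetp : PySem.List.pyGetD (List.map String.ofList (pvSplitF dynlist.toList)) 0 "" =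
          String.ofList p0 := by
        rw [hsp, List.map_cons, PySem.List.pyGetD_ofNat']
        rfl
      rw [hgetp]
      by_cases hz : (p0.length : Int) ≠ 0
      · rw [if_pos hz]
        apply hinj
        simp only [List.map_cons, ht]
        rw [List.cons_eq_cons]
        constructor
        · rw [String.toList_append, String.toList_append, String.toList_append, String.toList_ofList,
            String.toList_ofList, hh]
          rw [show (PySem.Str.slice dynlist none (some ((p0.length : Nat) : Int))).toList =
              List.take p0.length dynlist.toList from by
            simp [PySem.Str.slice, PySem.Chars.slice_eq_listSlice, PySem.List.slice_to_natCast]]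
          rw [hjoin, List.take_left]
          simp [pvMk]
        · simp [pvMk, Function.comp]
      · rw [if_neg hz]
        have hp0 : p0 = [] := by simpa using hz
        apply hinj
        simp only [List.map_cons]
        rw [hmapF]
        simp [pvMk, hp0, Function.comp]

-- ===== VERDICT (by name: the statement is the Claim_ definition above) =====
theorem split_dynlists_spec : Claim_equal_split_dynlists := by
  intro dynlist _
  exact split_dynlists_spec_aux dynlist
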